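-- pv_equiv track=rewrite | github.com/Gausslab-SeoulOffice/problems | yunjae/archery.py | solution
-- ===== SOURCE A (Python) =====
-- def solution(n, info):
--     answer = [0] * 11
--     temp = [0] * 11         # 라이언이 몇 발을 쐈는지 임시 기록할 배열
--     max_diff = 0
--
--     for subset in range(1, 1 << 10):   # 1 ~ 1023 (총 10칸짜리 과녁)
--         apeach, ryan, cnt = 0, 0, 0    # 어피치 점수, 라이언 점수, 쏜 화살 수
--         for i in range(10):            # i=0이면 정중앙
--             if subset & (1 << i):      # i번째 비트가 1인지 확인 (라이언이 해당 점수를 가져오려는 경우)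
--                 ryan += 10 - i
--                 temp[i] = info[i] + 1  # 어피치가 info[i]발을 쐈으니, 라이언은 그보다 1발 더 쏴야 점수를 가져올 수 있음
--                 cnt += temp[i]         # 라이언이 지금까지 쏜 화살 수를 누적
--             else:                      # 어피치가 이기거나 비기는 경우
--                 temp[i] = 0
--                 if info[i] > 0:
--                     apeach += 10 - i
--
--         if cnt > n:                    # 쏠 수 있는 화살 수를 초과하면 건너뜀
--             continue
--
--         temp[10] = n - cnt             # n발을 다 쏴야 하므로, 남은 화살은 모두 0점에 쏜다고 가정
--
--         # 라이언이 가장 큰 점수차로 우승할 수 있는 방법이 여러 가지라면?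
--         if ryan - apeach > max_diff:       # 점수 차이가 현재까지의 최대보다 클 경우 최적이므로
--             max_diff = ryan - apeach       # 갱신
--             answer = temp.copy()           # 현재 조합을 정답으로 저장
--
--         elif ryan - apeach == max_diff:     # 동점인 경우, 더 우선시되는 조합을 찾는다
--             for i in reversed(range(11)):  # 가장 낮은 점수를 더 많이 맞힌 경우를 우선시, 내림차순 탐색
--                 if temp[i] > answer[i]:     # 현재 조합이 answer보다 더 많은 화살을 쏘므로 더 우선시되는 조합
--                     answer = temp.copy()
--                     break
--                 elif temp[i] < answer[i]:   # 덜 우선시되는 조합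
--                     break
--
--     if max_diff == 0:   # 라이언의 점수가 어피치보다 낮거나 같으면 그냥 0으로 취급
--         return [-1]
--
--     return answer
-- ===== SOURCE B (Python) =====
-- def solution(n, info):
--     # DFS over zones 9..0 (off-branch first), threading scores/arrow count and
--     # building each candidate incrementally instead of decoding bitmasks.
--     def tiebreak_better(cand, ans):
--         for j in reversed(range(11)):
--             if cand[j] > ans[j]:
--                 return True
--             if cand[j] < ans[j]:
--                 return False
--         return False
--
--     def dfs(i, ryan, apeach, cnt, temp, best):
--         if i < 0:
--             if ryan == 0 or cnt > n:
--                 return best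
--             ans, max_diff = best
--             cand = temp + [n - cnt]
--             diff = ryan - apeach
--             if diff > max_diff:
--                 return (cand, diff)
--             if diff == max_diff and tiebreak_better(cand, ans):
--                 return (cand, max_diff)
--             return best
--         best = dfs(i - 1, ryan,
--                    apeach + (10 - i if info[i] > 0 else 0),
--                    cnt, [0] + temp, best)
--         best = dfs(i - 1, ryan + 10 - i, apeach,
--                    cnt + info[i] + 1, [info[i] + 1] + temp, best)
--         return best
--
--     ans, max_diff = dfs(9, 0, 0, 0, [], ([0] * 11, 0))
--     return [-1] if max_diff == 0 else ans
-- ===== Notes on version B (the rewrite author's own statement) =====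
-- stated objective: alternative
-- what changed: A decodes each of the 1023 bitmasks with an inner loop over all 10 zones and a mutated temp array; B replaces this with a recursive DFS over zones that threads ryan/apeach/cnt and builds each candidate list incrementally along the path, applying the same strict-greater/reversed-index tie-break at the leaves.
import Mathlib
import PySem

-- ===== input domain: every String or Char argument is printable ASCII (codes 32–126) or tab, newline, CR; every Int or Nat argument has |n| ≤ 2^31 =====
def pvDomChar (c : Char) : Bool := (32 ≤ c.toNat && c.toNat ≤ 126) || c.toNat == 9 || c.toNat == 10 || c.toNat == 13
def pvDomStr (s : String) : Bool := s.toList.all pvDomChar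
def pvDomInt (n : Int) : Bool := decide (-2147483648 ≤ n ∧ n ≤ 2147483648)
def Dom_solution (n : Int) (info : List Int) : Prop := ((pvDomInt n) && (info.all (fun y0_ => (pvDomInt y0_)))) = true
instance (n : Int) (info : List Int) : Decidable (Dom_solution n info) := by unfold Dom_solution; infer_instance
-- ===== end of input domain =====

-- B replaces A's flat bitmask enumeration by a DFS over zones that threads scores and
-- builds each candidate incrementally (objective: alternative decomposition, same cost).

-- ===== PORT A =====
-- tie-break loop 'for i in reversed(range(11)): …' (reversed(range(11)) = pyRange 10 (-1) (-1));
-- indices are always in range on length-11 lists, so pyGetD is exact here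
def tieLoopA (temp answer : List Int) : List Int → List Int
  | [] => answer
  | i :: rest =>
    if PySem.List.pyGetD temp i 0 > PySem.List.pyGetD answer i 0 then temp
    else if PySem.List.pyGetD temp i 0 < PySem.List.pyGetD answer i 0 then answer
    else tieLoopA temp answer rest

-- body of 'for i in range(10)'; state (apeach, ryan, cnt, temp); 'temp[i] = v' is List.set
-- (i ∈ [0,10) is always a valid index of the length-11 temp, so set/pyGetD are exact;
-- info[i] is exact under Pre_ (10 ≤ info.length))
def innerStepA (info : List Int) (subset : Int) (q : Int × Int × Int × List Int) (i : Int) :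
    Int × Int × Int × List Int :=
  let apeach := q.1; let ryan := q.2.1; let cnt := q.2.2.1; let temp := q.2.2.2
  if PySem.Int.band subset ((1:Int) <<< i) ≠ 0 then
    (apeach, ryan + (10 - i), cnt + (PySem.List.pyGetD info i 0 + 1),
     temp.set i.toNat (PySem.List.pyGetD info i 0 + 1))
  else
    ((if PySem.List.pyGetD info i 0 > 0 then apeach + (10 - i) else apeach), ryan, cnt,
     temp.set i.toNat 0)

-- body of 'for subset in range(1, 1 << 10)'; state (answer, temp, max_diff)
def outerStepA (n : Int) (info : List Int) (st : List Int × List Int × Int) (subset : Int) :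
    List Int × List Int × Int :=
  let answer := st.1; let temp := st.2.1; let maxDiff := st.2.2
  let q := (PySem.List.pyRange 0 10 1).foldl (innerStepA info subset) (0, 0, 0, temp)
  let apeach := q.1; let ryan := q.2.1; let cnt := q.2.2.1; let temp := q.2.2.2
  if cnt > n then (answer, temp, maxDiff)
  else
    let temp := temp.set 10 (n - cnt)
    if ryan - apeach > maxDiff then (temp, temp, ryan - apeach)
    else if ryan - apeach = maxDiff then
      (tieLoopA temp answer (PySem.List.pyRange 10 (-1) (-1)), temp, maxDiff)
    else (answer, temp, maxDiff)

def solution (n : Int) (info : List Int) : List Int :=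
  let answer : List Int := List.replicate 11 0
  let temp : List Int := List.replicate 11 0
  let maxDiff : Int := 0
  let st := (PySem.List.pyRange 1 1024 1).foldl (outerStepA n info) (answer, temp, maxDiff)
  if st.2.2 = 0 then [-1] else st.1

-- ===== PORT B =====
-- 'tiebreak_better(cand, ans)' (loop over reversed(range(11)), indices always in range)
def tiebreakBetter (cand ans : List Int) : List Int → Bool
  | [] => false
  | j :: rest =>
    if PySem.List.pyGetD cand j 0 > PySem.List.pyGetD ans j 0 then true
    else if PySem.List.pyGetD cand j 0 < PySem.List.pyGetD ans j 0 then false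
    else tiebreakBetter cand ans rest

-- leaf body of dfs (python i = -1)
def leafB (n : Int) (ryan apeach cnt : Int) (temp : List Int) (best : List Int × Int) :
    List Int × Int :=
  if ryan = 0 ∨ cnt > n then best
  else
    let ans := best.1; let maxDiff := best.2
    let cand := temp ++ [n - cnt]
    let diff := ryan - apeach
    if diff > maxDiff then (cand, diff)
    else if diff = maxDiff ∧ tiebreakBetter cand ans (PySem.List.pyRange 10 (-1) (-1)) = true then
      (cand, maxDiff)
    else best

-- 'dfs(i, ryan, apeach, cnt, temp, best)': Lean index k is python i + 1 (dfsB 0 = leaf i = -1);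
-- info[i] is exact under Pre_ (10 ≤ info.length)
def dfsB (n : Int) (info : List Int) :
    Nat → Int → Int → Int → List Int → List Int × Int → List Int × Int
  | 0, ryan, apeach, cnt, temp, best => leafB n ryan apeach cnt temp best
  | k+1, ryan, apeach, cnt, temp, best =>
    let i : Int := (k : Int)
    let best' := dfsB n info k ryan
      (apeach + (if PySem.List.pyGetD info i 0 > 0 then 10 - i else 0)) cnt
      ((0:Int) :: temp) best
    dfsB n info k (ryan + (10 - i)) apeach (cnt + (PySem.List.pyGetD info i 0 + 1))
      ((PySem.List.pyGetD info i 0 + 1) :: temp) best'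

def solution_alt (n : Int) (info : List Int) : List Int :=
  let p := dfsB n info 10 0 0 0 [] (List.replicate 11 0, 0)
  if p.2 = 0 then [-1] else p.1

-- ===== PRECONDITION & SPEC =====
-- Pre_ excludes only info with fewer than 10 entries, on which A raises IndexError
def Pre_solution (n : Int) (info : List Int) : Prop := 10 ≤ info.length
instance (n : Int) (info : List Int) : Decidable (Pre_solution n info) := by
  unfold Pre_solution; infer_instance

def pvWitness_solution : Int × List Int := (5, [2, 1, 1, 1, 0, 0, 0, 0, 0, 0])

def Spec_solution (n : Int) (info : List Int) (out : List Int) : Prop := out = solution_alt n info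
instance (n : Int) (info : List Int) (out : List Int) : Decidable (Spec_solution n info out) := by
  unfold Spec_solution; infer_instance

-- ===== CLAIM (what is proved, stated in full; the proofs are below) =====
def Claim_equal_solution : Prop := ∀ (n : Int) (info : List Int), Dom_solution n info →
  Pre_solution n info → Spec_solution n info (solution n info)

-- ===== LEMMAS AND PROOFS =====

-- per-subset quantities, peeling the top zone k (bit k of the Nat subset s)
def ryanOf (s : Nat) : Nat → Int
  | 0 => 0
  | k+1 => ryanOf s k + (if s.testBit k then 10 - (k : Int) else 0)

def apeachOf (info : List Int) (s : Nat) : Nat → Int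
  | 0 => 0
  | k+1 => apeachOf info s k +
      (if s.testBit k = false ∧ PySem.List.pyGetD info (k : Int) 0 > 0 then 10 - (k : Int) else 0)

def cntOf (info : List Int) (s : Nat) : Nat → Int
  | 0 => 0
  | k+1 => cntOf info s k + (if s.testBit k then PySem.List.pyGetD info (k : Int) 0 + 1 else 0)

def tempOfL (info : List Int) (s : Nat) : Nat → List Int
  | 0 => []
  | k+1 => tempOfL info s k ++ [if s.testBit k then PySem.List.pyGetD info (k : Int) 0 + 1 else 0]

-- clean per-subset best-update both folds are reduced to
def subStep (n : Int) (info : List Int) (b : List Int × Int) (sN : Nat) : List Int × Int :=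
  let r := ryanOf sN 10
  let a := apeachOf info sN 10
  let c := cntOf info sN 10
  if c > n then b
  else
    let cand := tempOfL info sN 10 ++ [n - c]
    if r - a > b.2 then (cand, r - a)
    else if r - a = b.2 then (tieLoopA cand b.1 (PySem.List.pyRange 10 (-1) (-1)), b.2)
    else b

lemma tempOfL_length (info : List Int) (s : Nat) : ∀ k, (tempOfL info s k).length = k := by
  intro k; induction k with
  | zero => rfl
  | succ k ih => simp [tempOfL, ih]

lemma band_testBit (s : Int) (hs : 0 ≤ s) (k : Nat) :
    (PySem.Int.band s ((1:Int) <<< ((k : Nat) : Int)) ≠ 0) ↔ s.toNat.testBit k = true := by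
  rw [Int.one_shiftLeft, ← Int.toNat_of_nonneg hs, PySem.Int.band_natCast]
  simp only [ne_eq, Int.natCast_eq_zero, Nat.and_two_pow, Int.toNat_natCast]
  cases hb : s.toNat.testBit k <;> simp [Nat.pow_eq_zero]

lemma ryanOf_congr (s s' : Nat) (k : Nat) (h : ∀ j < k, s.testBit j = s'.testBit j) :
    ryanOf s k = ryanOf s' k := by
  induction k with
  | zero => rfl
  | succ k ih =>
    simp only [ryanOf, h k (Nat.lt_succ_self k),
      ih (fun j hj => h j (Nat.lt_succ_of_lt hj))]

lemma apeachOf_congr (info : List Int) (s s' : Nat) (k : Nat)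
    (h : ∀ j < k, s.testBit j = s'.testBit j) :
    apeachOf info s k = apeachOf info s' k := by
  induction k with
  | zero => rfl
  | succ k ih =>
    simp only [apeachOf, h k (Nat.lt_succ_self k),
      ih (fun j hj => h j (Nat.lt_succ_of_lt hj))]

lemma cntOf_congr (info : List Int) (s s' : Nat) (k : Nat)
    (h : ∀ j < k, s.testBit j = s'.testBit j) :
    cntOf info s k = cntOf info s' k := by
  induction k with
  | zero => rfl
  | succ k ih =>
    simp only [cntOf, h k (Nat.lt_succ_self k),
      ih (fun j hj => h j (Nat.lt_succ_of_lt hj))]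

lemma tempOfL_congr (info : List Int) (s s' : Nat) (k : Nat)
    (h : ∀ j < k, s.testBit j = s'.testBit j) :
    tempOfL info s k = tempOfL info s' k := by
  induction k with
  | zero => rfl
  | succ k ih =>
    simp only [tempOfL, h k (Nat.lt_succ_self k),
      ih (fun j hj => h j (Nat.lt_succ_of_lt hj))]

lemma bits_two_pow_add (s k : Nat) : ∀ j < k, (2^k + s).testBit j = s.testBit j :=
  fun j hj => Nat.testBit_two_pow_add_gt hj s

lemma testBit_top (s k : Nat) (h : s < 2^k) : (2^k + s).testBit k = true := by
  rw [Nat.testBit_two_pow_add_eq, Nat.testBit_lt_two_pow h]; rfl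

lemma ryanOf_zero (k : Nat) : ryanOf 0 k = 0 := by
  induction k with
  | zero => rfl
  | succ k ih => simp [ryanOf, ih]

lemma ryanOf_nonneg (s : Nat) : ∀ k, k ≤ 10 → 0 ≤ ryanOf s k := by
  intro k; induction k with
  | zero => intro _; simp [ryanOf]
  | succ k ih =>
    intro hk
    have h1 := ih (by omega)
    have h2 : (k : Int) ≤ 9 := by exact_mod_cast (by omega : k ≤ 9)
    simp only [ryanOf]
    split <;> omega

lemma ryanOf_zero_bits (s : Nat) : ∀ k, k ≤ 10 → ryanOf s k = 0 → ∀ j, j < k → s.testBit j = false := by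
  intro k
  induction k with
  | zero => intro _ _ j hj; omega
  | succ k ih =>
    intro hk h j hj
    have hnn := ryanOf_nonneg s k (by omega)
    have hkc : (k : Int) ≤ 9 := by exact_mod_cast (by omega : k ≤ 9)
    simp only [ryanOf] at h
    by_cases hb : s.testBit k
    · rw [if_pos hb] at h; omega
    · rw [if_neg hb] at h
      rcases (by omega : j < k ∨ j = k) with hlt | rfl
      · exact ih (by omega) (by omega) j hlt
      · simpa using hb

lemma ryanOf_pos (s : Nat) (h1 : 1 ≤ s) (h2 : s < 1024) : 0 < ryanOf s 10 := by
  rcases lt_or_eq_of_le (ryanOf_nonneg s 10 le_rfl) with h | h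
  · exact h
  · exfalso
    have hb := ryanOf_zero_bits s 10 le_rfl h.symm
    have : s = 0 := by
      apply Nat.eq_of_testBit_eq
      intro i
      simp only [Nat.zero_testBit]
      by_cases hi : i < 10
      · exact hb i hi
      · refine Nat.testBit_lt_two_pow (lt_of_lt_of_le h2 ?_)
        calc (1024:Nat) = 2^10 := by norm_num
          _ ≤ 2^i := Nat.pow_le_pow_right (by norm_num) (by omega)
    omega

-- the tie-break helpers of the two ports compute the same update
lemma tie_bridge (c a : List Int) : ∀ l, tieLoopA c a l = (if tiebreakBetter c a l then c else a) := by
  intro l; induction l with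
  | nil => simp [tieLoopA, tiebreakBetter]
  | cons j rest ih =>
    simp only [tieLoopA, tiebreakBetter]
    split
    · simp
    · split
      · simp
      · exact ih

-- B's DFS enumerates exactly the subsets 0 ≤ s < 2^k, in increasing order
lemma dfsB_eq (n : Int) (info : List Int) : ∀ (k : Nat) (r a c : Int) (t : List Int)
    (best : List Int × Int),
    dfsB n info k r a c t best =
      (List.range (2^k)).foldl
        (fun b s => leafB n (r + ryanOf s k) (a + apeachOf info s k) (c + cntOf info s k)
          (tempOfL info s k ++ t) b) best := by
  intro k
  induction k with
  | zero =>
    intro r a c t best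
    simp [dfsB, ryanOf, apeachOf, cntOf, tempOfL]
  | succ k ih =>
    intro r a c t best
    have hsplit : 2^(k+1) = 2^k + 2^k := by rw [pow_succ]; omega
    simp only [dfsB]
    rw [ih, ih, hsplit, List.range_add, List.foldl_append, List.foldl_map]
    have hfirst :
        (List.range (2^k)).foldl
          (fun b s => leafB n (r + ryanOf s k)
            ((a + (if PySem.List.pyGetD info (k : Int) 0 > 0 then 10 - (k : Int) else 0))
              + apeachOf info s k)
            (c + cntOf info s k) (tempOfL info s k ++ ((0:Int) :: t)) b) best =
        (List.range (2^k)).foldl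
          (fun b s => leafB n (r + ryanOf s (k+1)) (a + apeachOf info s (k+1))
            (c + cntOf info s (k+1)) (tempOfL info s (k+1) ++ t) b) best := by
      apply PySem.List.foldl_congr_mem
      intro b s hsmem
      have hlt := List.mem_range.mp hsmem
      have hbit : s.testBit k = false := Nat.testBit_lt_two_pow hlt
      have e1 : r + ryanOf s (k+1) = r + ryanOf s k := by simp [ryanOf, hbit]
      have e2 : a + apeachOf info s (k+1)
          = (a + (if PySem.List.pyGetD info (k : Int) 0 > 0 then 10 - (k : Int) else 0))
            + apeachOf info s k := by
        simp only [apeachOf, hbit, true_and]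
        split <;> ring
      have e3 : c + cntOf info s (k+1) = c + cntOf info s k := by simp [cntOf, hbit]
      have e4 : tempOfL info s (k+1) ++ t = tempOfL info s k ++ ((0:Int) :: t) := by
        simp [tempOfL, hbit]
      rw [e1, e2, e3, e4]
    rw [hfirst]
    apply PySem.List.foldl_congr_mem
    intro b s hsmem
    have hlt := List.mem_range.mp hsmem
    have hbits := bits_two_pow_add s k
    have htop := testBit_top s k hlt
    have e1 : (r + (10 - (k : Int))) + ryanOf s k = r + ryanOf (2^k + s) (k+1) := by
      simp only [ryanOf, htop, if_true, ryanOf_congr (2^k + s) s k hbits]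
      ring
    have e2 : a + apeachOf info s k = a + apeachOf info (2^k + s) (k+1) := by
      simp [apeachOf, htop, apeachOf_congr info (2^k + s) s k hbits]
    have e3 : (c + (PySem.List.pyGetD info (k : Int) 0 + 1)) + cntOf info s k
        = c + cntOf info (2^k + s) (k+1) := by
      simp only [cntOf, htop, if_true, cntOf_congr info (2^k + s) s k hbits]
      ring
    have e4 : tempOfL info s k ++ ((PySem.List.pyGetD info (k : Int) 0 + 1) :: t)
        = tempOfL info (2^k + s) (k+1) ++ t := by
      simp [tempOfL, htop, tempOfL_congr info (2^k + s) s k hbits]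
    rw [e1, e2, e3, e4]

lemma temp_set (l : List Int) (k : Nat) (hl : l.length = k) (t : List Int) (hk : k < t.length)
    (e : Int) : (l ++ t.drop k).set k e = (l ++ [e]) ++ t.drop (k+1) := by
  subst hl
  rw [List.drop_eq_getElem_cons hk]
  simp [-List.getElem_cons_drop]

-- A's inner loop over range(10): characterisation of the accumulated state
lemma innerA (info : List Int) (s : Int) (hs : 0 ≤ s) :
    ∀ (k : Nat) (t : List Int), k ≤ t.length →
    (PySem.List.pyRange 0 (k : Int) 1).foldl (innerStepA info s) (0, 0, 0, t)
      = (apeachOf info s.toNat k, ryanOf s.toNat k, cntOf info s.toNat k,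
         tempOfL info s.toNat k ++ t.drop k) := by
  intro k
  induction k with
  | zero =>
    intro t ht
    rw [show ((0 : Nat) : Int) = 0 by norm_num, PySem.List.pyRange_one_eq_nil le_rfl]
    simp [ryanOf, apeachOf, cntOf, tempOfL]
  | succ k ih =>
    intro t ht
    have hk : k < t.length := by omega
    rw [show ((k+1 : Nat) : Int) = (k : Int) + 1 by push_cast; ring,
      PySem.List.pyRange_one_succ_right (by positivity), List.foldl_append,
      ih t (by omega)]
    simp only [List.foldl_cons, List.foldl_nil, innerStepA, Int.toNat_natCast]
    by_cases hbit : s.toNat.testBit k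
    · rw [if_pos ((band_testBit s hs k).mpr hbit)]
      rw [temp_set _ _ (tempOfL_length info s.toNat k) t hk]
      simp [ryanOf, apeachOf, cntOf, tempOfL, hbit]
    · rw [if_neg (by simpa using (band_testBit s hs k).not.mpr (by simp [hbit]))]
      rw [temp_set _ _ (tempOfL_length info s.toNat k) t hk]
      simp only [ryanOf, apeachOf, cntOf, tempOfL, hbit, if_false,
        Bool.false_eq_true, true_and, add_zero, List.append_assoc, List.cons_append,
        List.nil_append]
      split <;> simp

-- one outer iteration, projected to (answer, max_diff)
set_option maxHeartbeats 1000000 in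
set_option maxRecDepth 40000 in
lemma outer_char (n : Int) (info : List Int) (s : Int) (hs : 0 ≤ s) (ans t : List Int)
    (md : Int) (ht : t.length = 11) :
    ∃ t', t'.length = 11 ∧
      outerStepA n info (ans, t, md) s =
        ((subStep n info (ans, md) s.toNat).1, t', (subStep n info (ans, md) s.toNat).2) := by
  have hinner := innerA info s hs 10 t (by omega)
  norm_num at hinner
  have hlen10 := tempOfL_length info s.toNat 10
  have hdrop11 : t.drop 11 = [] := by
    rw [List.drop_eq_nil_iff]; omega
  simp only [outerStepA, hinner, subStep]
  rw [temp_set _ _ hlen10 t (by omega), hdrop11, List.append_nil]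
  split_ifs with hc hgt heq
  · exact ⟨_, by simp [hlen10, ht], rfl⟩
  · exact ⟨_, by simp [hlen10], rfl⟩
  · exact ⟨_, by simp [hlen10], rfl⟩
  · exact ⟨_, by simp [hlen10], rfl⟩

lemma outer_fold (n : Int) (info : List Int) : ∀ (ss : List Int), (∀ s ∈ ss, 0 ≤ s) →
    ∀ (ans t : List Int) (md : Int), t.length = 11 →
    ((ss.foldl (outerStepA n info) (ans, t, md)).1,
     (ss.foldl (outerStepA n info) (ans, t, md)).2.2)
      = ss.foldl (fun b s => subStep n info b s.toNat) (ans, md) := by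
  intro ss; induction ss with
  | nil => intro _ ans t md ht; simp
  | cons s rest ih =>
    intro hmem ans t md ht
    obtain ⟨t', ht', heq⟩ := outer_char n info s (hmem s (by simp)) ans t md ht
    simp only [List.foldl_cons, heq]
    exact ih (fun x hx => hmem x (by simp [hx])) _ t' _ ht'

set_option maxRecDepth 10000 in
lemma range_split : List.range 1024 = 0 :: (PySem.List.pyRange 1 1024 1).map Int.toNat := by
  decide

-- the two clean per-subset steps agree on 1 ≤ s ≤ 1023
lemma leafB_eq_subStep (n : Int) (info : List Int) (s : Nat) (h1 : 1 ≤ s) (h2 : s < 1024)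
    (b : List Int × Int) :
    leafB n (ryanOf s 10) (apeachOf info s 10) (cntOf info s 10) (tempOfL info s 10) b
      = subStep n info b s := by
  have hr := ryanOf_pos s h1 h2
  have hnz : ryanOf s 10 ≠ 0 := by omega
  by_cases hc : cntOf info s 10 > n
  · simp [leafB, subStep, hc]
  · by_cases hgt : ryanOf s 10 - apeachOf info s 10 > b.2
    · simp [leafB, subStep, hc, hgt, hnz]
    · by_cases heq : ryanOf s 10 - apeachOf info s 10 = b.2
      · by_cases htie : tiebreakBetter (tempOfL info s 10 ++ [n - cntOf info s 10]) b.1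
            (PySem.List.pyRange 10 (-1) (-1)) = true
        · simp [leafB, subStep, hc, heq, hnz, tie_bridge, htie]
        · simp [leafB, subStep, hc, heq, hnz, tie_bridge, htie]
      · simp [leafB, subStep, hc, hgt, heq, hnz]

-- ===== VERDICT (by name: the statement is the Claim_ definition above) =====
set_option maxHeartbeats 1000000 in
set_option maxRecDepth 10000 in
theorem solution_spec : Claim_equal_solution := by
  intro n info _ hpre
  unfold Pre_solution at hpre
  show solution n info = solution_alt n info
  have hbound : ∀ s ∈ PySem.List.pyRange 1 1024 1, (0:Int) ≤ s := by
    intro s hsm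
    have := (PySem.List.mem_pyRange_one).mp hsm
    omega
  have hA := outer_fold n info (PySem.List.pyRange 1 1024 1) hbound
      (List.replicate 11 0) (List.replicate 11 0) 0 (by simp)
  have hB : solution_alt n info =
      (if ((PySem.List.pyRange 1 1024 1).foldl (fun b s => subStep n info b s.toNat)
            (List.replicate 11 0, 0)).2 = 0 then [-1]
       else ((PySem.List.pyRange 1 1024 1).foldl (fun b s => subStep n info b s.toNat)
            (List.replicate 11 0, 0)).1) := by
    simp only [solution_alt]
    rw [dfsB_eq]
    simp only [zero_add, List.append_nil]
    rw [show (2:Nat)^10 = 1024 by norm_num, range_split, List.foldl_cons]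
    rw [show leafB n (ryanOf 0 10) (apeachOf info 0 10) (cntOf info 0 10)
        (tempOfL info 0 10) ((List.replicate 11 0 : List Int), (0:Int))
          = ((List.replicate 11 0 : List Int), (0:Int)) from by
      simp [leafB, ryanOf_zero]]
    rw [List.foldl_map]
    rw [PySem.List.foldl_congr_mem (PySem.List.pyRange 1 1024 1)
      (fun (x : List Int × Int) (y : Int) => leafB n (ryanOf y.toNat 10)
        (apeachOf info y.toNat 10) (cntOf info y.toNat 10) (tempOfL info y.toNat 10) x)
      (fun (b : List Int × Int) (s : Int) => subStep n info b s.toNat)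
      ((List.replicate 11 0 : List Int), (0:Int))
      (by
        intro b s hsm
        have hm := (PySem.List.mem_pyRange_one).mp hsm
        exact leafB_eq_subStep n info s.toNat (by omega) (by omega) b)]
  rw [hB]
  simp only [solution]
  have h2 := congrArg Prod.snd hA
  have h1 := congrArg Prod.fst hA
  dsimp only at h1 h2
  rw [h2, h1]
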